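-- pv_equiv track=rewrite | github.com/nickkamel/Truth_Seq_Er_CLI | folding.py | generate_fold_constraint
-- ===== SOURCE A (Python) =====
-- def generate_fold_constraint(seq_len, constrained_base_ids):
--     constraints = ''
--     for b in range(1, seq_len + 1): #We add the +1 here because the constrained_base_ids are 1-indexed
--         if b in constrained_base_ids:
--             constraints += 'x'
--         else:
--             constraints += '.'
--     return constraints
-- ===== SOURCE B (Python) =====
-- def generate_fold_constraint(seq_len, constrained_base_ids):
--     mask = ['.'] * max(seq_len, 0)
--     for i in constrained_base_ids:
--         if 1 <= i <= seq_len: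
--             mask[i - 1] = 'x'
--     return ''.join(mask)
-- ===== Notes on version B (the rewrite author's own statement) =====
-- stated objective: faster
-- what changed: Replaces A's per-position loop with a membership scan over the ids list by an allocate-then-scatter pass: a '.'-filled list of seq_len characters gets 'x' written at id-1 for each in-range constrained id, then joined.
import Mathlib
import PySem

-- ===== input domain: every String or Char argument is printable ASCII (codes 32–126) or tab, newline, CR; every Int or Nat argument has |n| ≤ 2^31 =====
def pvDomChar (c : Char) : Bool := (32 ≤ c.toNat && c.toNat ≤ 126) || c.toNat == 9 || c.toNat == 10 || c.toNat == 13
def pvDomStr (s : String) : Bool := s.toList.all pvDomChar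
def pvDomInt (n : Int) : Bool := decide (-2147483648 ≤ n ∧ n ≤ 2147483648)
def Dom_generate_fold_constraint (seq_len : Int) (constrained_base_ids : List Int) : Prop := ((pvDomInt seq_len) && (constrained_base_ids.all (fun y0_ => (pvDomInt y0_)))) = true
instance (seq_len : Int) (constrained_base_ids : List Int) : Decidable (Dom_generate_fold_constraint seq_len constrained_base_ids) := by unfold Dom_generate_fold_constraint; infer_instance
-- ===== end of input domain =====

-- B replaces A's per-position membership scan with an init-then-scatter pass over
-- the constrained ids only (objective: alternative decomposition).

-- ===== PORT A =====
def generate_fold_constraint (seq_len : Int) (constrained_base_ids : List Int) : String :=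
  (PySem.List.pyRange 1 (seq_len + 1) 1).foldl
    (fun acc b => if b ∈ constrained_base_ids then acc ++ "x" else acc ++ ".") ""

-- ===== PORT B =====
def generate_fold_constraint_alt (seq_len : Int) (constrained_base_ids : List Int) : String :=
  String.ofList
    (constrained_base_ids.foldl
      (fun cs i => if 1 ≤ i ∧ i ≤ seq_len then cs.set (i - 1).toNat 'x' else cs)
      (List.replicate seq_len.toNat '.'))

-- ===== PRECONDITION & SPEC =====
def Spec_generate_fold_constraint (seq_len : Int) (constrained_base_ids : List Int) (out : String) : Prop := out = generate_fold_constraint_alt seq_len constrained_base_ids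
instance (seq_len : Int) (constrained_base_ids : List Int) (out : String) : Decidable (Spec_generate_fold_constraint seq_len constrained_base_ids out) := by unfold Spec_generate_fold_constraint; infer_instance

-- ===== CLAIM (what is proved, stated in full; the proofs are below) =====
def Claim_equal_generate_fold_constraint : Prop := ∀ (seq_len : Int) (constrained_base_ids : List Int), Dom_generate_fold_constraint seq_len constrained_base_ids → Spec_generate_fold_constraint seq_len constrained_base_ids (generate_fold_constraint seq_len constrained_base_ids)

-- ===== LEMMAS AND PROOFS =====

-- A's loop appends one character per position: its result is the mask of its range.
theorem foldA_toList (ids : List Int) :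
    ∀ (L : List Int) (s : String),
      (L.foldl (fun acc b => if b ∈ ids then acc ++ "x" else acc ++ ".") s).toList
      = s.toList ++ L.map (fun b => if b ∈ ids then 'x' else '.') := by
  intro L
  induction L with
  | nil => intro s; simp
  | cons b rest ih =>
    intro s
    simp only [List.foldl_cons, List.map_cons]
    rw [ih]
    by_cases hb : b ∈ ids <;> simp [hb, String.toList_append]

-- Pointwise description of B's scatter loop.
theorem scatter_get? (N : Int) :
    ∀ (ids : List Int) (cs : List Char) (j : Nat),
      (ids.foldl (fun cs i => if 1 ≤ i ∧ i ≤ N then cs.set (i - 1).toNat 'x' else cs) cs)[j]?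
      = if (∃ i ∈ ids, 1 ≤ i ∧ i ≤ N ∧ (i - 1).toNat = j) ∧ j < cs.length
        then some 'x' else cs[j]? := by
  intro ids
  induction ids with
  | nil => intro cs j; simp
  | cons i rest ih =>
    intro cs j
    simp only [List.foldl_cons]
    have hcons : (∃ x ∈ i :: rest, 1 ≤ x ∧ x ≤ N ∧ (x - 1).toNat = j)
        ↔ (1 ≤ i ∧ i ≤ N ∧ (i - 1).toNat = j) ∨ (∃ x ∈ rest, 1 ≤ x ∧ x ≤ N ∧ (x - 1).toNat = j) := by
      constructor
      · rintro ⟨x, hx, h⟩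
        rcases List.mem_cons.mp hx with rfl | hx'
        · exact Or.inl h
        · exact Or.inr ⟨x, hx', h⟩
      · rintro (h | ⟨x, hx, h⟩)
        · exact ⟨i, List.mem_cons_self .., h⟩
        · exact ⟨x, List.mem_cons_of_mem _ hx, h⟩
    by_cases hg : 1 ≤ i ∧ i ≤ N
    · rw [if_pos hg, ih, List.length_set, List.getElem?_set]
      split_ifs with h1 h2 h3 h4 h5 h6 h7 <;> try rfl
      · exact absurd ⟨hcons.mpr (Or.inr h1.1), h1.2⟩ h2
      · exact absurd ⟨hcons.mpr (Or.inl ⟨hg.1, hg.2, h3⟩), h3 ▸ h4⟩ h5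
      · exact h4 (h3 ▸ h6.2)
      · exact (List.getElem?_eq_none (by omega)).symm
      · exfalso
        rcases hcons.mp h7.1 with h | h
        · exact h3 h.2.2
        · exact h1 ⟨h, h7.2⟩
    · rw [if_neg hg, ih]
      have heq : ((∃ x ∈ i :: rest, 1 ≤ x ∧ x ≤ N ∧ (x - 1).toNat = j) ∧ j < cs.length)
          ↔ ((∃ x ∈ rest, 1 ≤ x ∧ x ≤ N ∧ (x - 1).toNat = j) ∧ j < cs.length) := by
        rw [hcons]
        constructor
        · rintro ⟨h | h, hl⟩
          · exact absurd ⟨h.1, h.2.1⟩ hg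
          · exact ⟨h, hl⟩
        · rintro ⟨h, hl⟩; exact ⟨Or.inr h, hl⟩
      rw [if_congr heq rfl rfl]

-- B's scatter result is exactly the mask list A builds.
theorem scatter_eq_mask (N : Int) (ids : List Int) :
    (ids.foldl (fun cs i => if 1 ≤ i ∧ i ≤ N then cs.set (i - 1).toNat 'x' else cs)
      (List.replicate N.toNat '.'))
    = (List.range N.toNat).map (fun (k : Nat) => if ((1 : Int) + (k : Int)) ∈ ids then 'x' else '.') := by
  apply List.ext_getElem?
  intro j
  rw [scatter_get?, List.getElem?_map]
  by_cases hj : j < N.toNat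
  · have hr : (List.range N.toNat)[j]? = some j := by
      rw [List.getElem?_eq_getElem (by simpa using hj)]
      simp
    rw [hr]
    have hmem : ((∃ i ∈ ids, 1 ≤ i ∧ i ≤ N ∧ (i - 1).toNat = j) ∧ j < (List.replicate N.toNat '.').length)
        ↔ ((1 : Int) + (j : Int)) ∈ ids := by
      simp only [List.length_replicate]
      constructor
      · rintro ⟨⟨i, hi, h1, h2, h3⟩, _⟩
        have : i = 1 + (j : Int) := by omega
        rwa [← this]
      · intro h
        exact ⟨⟨1 + (j : Int), h, by omega, by omega, by omega⟩, hj⟩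
    rw [if_congr hmem rfl rfl, Option.map_some]
    by_cases hx : ((1 : Int) + (j : Int)) ∈ ids
    · rw [if_pos hx]
      show some 'x' = some (if ((1 : Int) + (j : Int)) ∈ ids then 'x' else '.')
      rw [if_pos hx]
    · rw [if_neg hx, List.getElem?_replicate, if_pos hj]
      show some '.' = some (if ((1 : Int) + (j : Int)) ∈ ids then 'x' else '.')
      rw [if_neg hx]
  · have h1 : ¬ ((∃ i ∈ ids, 1 ≤ i ∧ i ≤ N ∧ (i - 1).toNat = j) ∧ j < (List.replicate N.toNat '.').length) := by
      simp only [List.length_replicate]; exact fun h => hj h.2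
    rw [if_neg h1,
        List.getElem?_eq_none (l := List.replicate N.toNat '.') (by simpa using Nat.le_of_not_lt hj),
        List.getElem?_eq_none (l := List.range N.toNat) (by simpa using Nat.le_of_not_lt hj)]
    rfl

-- ===== VERDICT (by name: the statement is the Claim_ definition above) =====
theorem generate_fold_constraint_spec : Claim_equal_generate_fold_constraint := by
  intro seq_len ids _
  show generate_fold_constraint seq_len ids = generate_fold_constraint_alt seq_len ids
  apply String.toList_inj.mp
  unfold generate_fold_constraint generate_fold_constraint_alt
  rw [foldA_toList, PySem.List.pyRange_one, String.toList_ofList, scatter_eq_mask]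
  have h : (seq_len + 1 - 1).toNat = seq_len.toNat := by omega
  rw [h, String.toList_ofList, List.nil_append, List.map_map]
  rfl
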